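-- pv_equiv track=rewrite | github.com/j-clemons/aoc2022 | day06/part1.py | compute
-- ===== SOURCE A (Python) =====
-- def compute(s: str) -> int:
--     chars = list(s)
--     marker_len = 14
--
--     for i in range(marker_len, len(chars)+1):
--         tmp = set(chars[i-marker_len:i])
--         if len(tmp) == marker_len:
--             return i
--
--     return 0
-- ===== SOURCE B (Python) =====
-- def compute(s: str) -> int:
--     marker_len = 14
--     last = {}          # char -> index of its most recent occurrence
--     start = 0          # start of the longest duplicate-free window ending here
--     for j, c in enumerate(s):
--         p = last.get(c, -1)
--         if p >= start:
--             start = p + 1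
--         last[c] = j
--         if j - start + 1 == marker_len:
--             return j + 1
--     return 0
-- ===== Notes on version B (the rewrite author's own statement) =====
-- stated objective: faster
-- what changed: Replaces the per-position rebuild of a 14-character set with a single last-seen-index sliding window: the window start jumps past the previous occurrence of each incoming character and the index is returned as soon as the window length reaches 14.
import Mathlib
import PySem

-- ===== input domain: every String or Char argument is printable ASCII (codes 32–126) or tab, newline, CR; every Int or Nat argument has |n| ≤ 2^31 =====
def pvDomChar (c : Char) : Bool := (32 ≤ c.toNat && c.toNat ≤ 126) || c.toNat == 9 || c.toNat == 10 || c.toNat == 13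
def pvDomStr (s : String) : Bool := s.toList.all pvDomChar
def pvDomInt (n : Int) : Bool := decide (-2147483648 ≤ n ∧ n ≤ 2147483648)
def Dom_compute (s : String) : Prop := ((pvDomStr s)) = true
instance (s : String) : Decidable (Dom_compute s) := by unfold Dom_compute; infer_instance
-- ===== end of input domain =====

-- B replaces A's per-index set rebuild by a one-pass last-seen-index sliding window (constant-factor faster; return value proved identical).

-- ===== PORT A =====
-- the 'for i in range(marker_len, len(chars)+1)' loop with early return
def computeGo (chars : List Char) : List Int → Int
  | [] => 0
  | i :: rest =>
    let tmp := PySem.Set.ofList (PySem.List.slice chars (some (i - 14)) (some i))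
    if (tmp.length : Int) = 14 then i else computeGo chars rest

def compute (s : String) : Int :=
  let chars := s.toList
  computeGo chars (PySem.List.pyRange 14 ((chars.length : Int) + 1) 1)

-- ===== PORT B =====
-- the 'for j, c in enumerate(s)' loop with early return; state = (window start, last-seen dict)
def computeAltGo : List Char → Int → Int → PySem.Dict Char Int → Int
  | [], _, _, _ => 0
  | c :: rest, j, start, last =>
    let p := last.getD c (-1)
    let start' := if start ≤ p then p + 1 else start
    let last' := last.insert c j
    if j - start' + 1 = 14 then j + 1 else computeAltGo rest (j + 1) start' last'

def compute_alt (s : String) : Int :=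
  computeAltGo s.toList 0 0 PySem.Dict.empty

-- ===== PRECONDITION & SPEC =====
def Spec_compute (s : String) (out : Int) : Prop := out = compute_alt s
instance (s : String) (out : Int) : Decidable (Spec_compute s out) := by unfold Spec_compute; infer_instance

-- ===== CLAIM (what is proved, stated in full; the proofs are below) =====
def Claim_equal_compute : Prop := ∀ (s : String), Dom_compute s → Spec_compute s (compute s)

-- ===== LEMMAS AND PROOFS =====

-- 'Good L i' : A's loop condition fires at i — the 14-char window ending at i is duplicate-free.
def Good (L : List Char) (i : Nat) : Prop :=
  14 ≤ i ∧ i ≤ L.length ∧ ((L.drop (i - 14)).take 14).Nodup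

-- shared characterisation of the returned value
def Res (L : List Char) (r : Int) : Prop :=
  (r = 0 ∧ ∀ i, ¬ Good L i) ∨
  (∃ i : Nat, r = (i : Int) ∧ Good L i ∧ ∀ i', i' < i → ¬ Good L i')

theorem Res_unique {L : List Char} {r1 r2 : Int} (h1 : Res L r1) (h2 : Res L r2) : r1 = r2 := by
  rcases h1 with ⟨e1, n1⟩ | ⟨i1, e1, g1, m1⟩ <;> rcases h2 with ⟨e2, n2⟩ | ⟨i2, e2, g2, m2⟩
  · omega
  · exact absurd g2 (n1 i2)
  · exact absurd g1 (n2 i1)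
  · have : i1 = i2 := by
      rcases Nat.lt_trichotomy i1 i2 with h | h | h
      · exact absurd g1 (m2 i1 h)
      · exact h
      · exact absurd g2 (m1 i2 h)
    omega

-- duplicate-free set has full length; full length means duplicate-free
theorem ofList_length_eq_iff {α : Type} [DecidableEq α] (w : List α) :
    (PySem.Set.ofList w).length = w.length ↔ w.Nodup := by
  constructor
  · intro h
    have hsub : (PySem.Set.ofList w) ⊆ w := fun x hx => (PySem.Set.mem_ofList w x).1 hx
    have hsp : List.Subperm (PySem.Set.ofList w) w := (PySem.Set.nodup_ofList w).subperm hsub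
    have hperm : List.Perm (PySem.Set.ofList w) w := hsp.perm_of_length_le (le_of_eq h.symm)
    exact hperm.nodup (PySem.Set.nodup_ofList w)
  · intro h
    have := PySem.Set.ofList_eq_self_of_nodup (xs := w) h
    rw [this]

theorem nodup_append_singleton (l : List Char) (c : Char) :
    (l ++ [c]).Nodup ↔ l.Nodup ∧ c ∉ l := by
  simp [List.nodup_append]
  intro _; constructor
  · intro h hc; exact h c hc rfl
  · intro h a ha he; exact h (he ▸ ha)

theorem mem_window_iff (l : List Char) (c : Char) (s j : Nat) (hj : j ≤ l.length) :
    c ∈ (l.take j).drop s ↔ ∃ k, s ≤ k ∧ k < j ∧ l[k]? = some c := by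
  constructor
  · intro h
    rw [List.mem_iff_getElem] at h
    obtain ⟨i, hi, he⟩ := h
    simp [List.length_drop, List.length_take] at hi
    refine ⟨s + i, by omega, by omega, ?_⟩
    rw [List.getElem_drop, List.getElem_take] at he
    rw [List.getElem?_eq_getElem (by omega)]
    simp [← he]
  · rintro ⟨k, hs, hk, he⟩
    rw [List.mem_iff_getElem]
    have hkl : k < l.length := by omega
    rw [List.getElem?_eq_getElem hkl] at he
    simp only [Option.some_inj] at he
    refine ⟨k - s, by simp [List.length_drop, List.length_take]; omega, ?_⟩
    rw [List.getElem_drop, List.getElem_take]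
    simp only [show s + (k - s) = k by omega]
    exact he

theorem lemA (L : List Char) :
    ∀ a : Nat, 14 ≤ a →
    (computeGo L (PySem.List.pyRange (a : Int) ((L.length : Int) + 1) 1) = 0 ∧
        ∀ i, a ≤ i → ¬ Good L i) ∨
    (∃ i : Nat, computeGo L (PySem.List.pyRange (a : Int) ((L.length : Int) + 1) 1) = (i : Int) ∧
        Good L i ∧ a ≤ i ∧ ∀ i', a ≤ i' → i' < i → ¬ Good L i') := by
  intro a ha
  generalize hfuel : L.length + 1 - a = fuel
  induction fuel generalizing a with
  | zero =>
    rw [PySem.List.pyRange_one_eq_nil (by omega)]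
    left
    refine ⟨rfl, fun i hai hg => ?_⟩
    obtain ⟨_, h2, _⟩ := hg
    omega
  | succ f ih =>
    have haL : a ≤ L.length := by omega
    rw [PySem.List.pyRange_one_cons (by omega)]
    simp only [computeGo]
    have hcast : (a : Int) - 14 = ((a - 14 : Nat) : Int) := by omega
    rw [hcast, PySem.List.slice_natCast, show a - (a - 14) = 14 by omega]
    have hwlen : ((L.drop (a - 14)).take 14).length = 14 := by
      simp [List.length_take, List.length_drop]; omega
    have hcond : (((PySem.Set.ofList ((L.drop (a - 14)).take 14)).length : Int) = 14) ↔
        ((L.drop (a - 14)).take 14).Nodup := by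
      rw [← ofList_length_eq_iff, hwlen]
      constructor
      · intro h; exact_mod_cast h
      · intro h; exact_mod_cast h
    have hgood : Good L a ↔ ((L.drop (a - 14)).take 14).Nodup := by
      unfold Good; constructor
      · rintro ⟨_, _, h⟩; exact h
      · intro h; exact ⟨ha, haL, h⟩
    split_ifs with hc
    · right
      exact ⟨a, rfl, hgood.2 (hcond.1 hc), le_refl a, fun i' h1 h2 _ => by omega⟩
    · have hnga : ¬ Good L a := fun hg => hc (hcond.2 (hgood.1 hg))
      have := ih (a + 1) (by omega) (by omega)
      rw [show ((a : Int) + 1) = (((a + 1 : Nat)) : Int) by push_cast; ring] at *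
      rcases this with ⟨he, hn⟩ | ⟨i, he, hg, hle, hmin⟩
      · left
        refine ⟨he, fun i hai => ?_⟩
        rcases Nat.eq_or_lt_of_le hai with h | h
        · exact h ▸ hnga
        · exact hn i h
      · right
        refine ⟨i, he, hg, by omega, fun i' h1 h2 => ?_⟩
        rcases Nat.eq_or_lt_of_le h1 with h | h
        · exact h ▸ hnga
        · exact hmin i' h h2

def LastSpec (L : List Char) (j : Nat) (c : Char) (v : Int) : Prop :=
  (v = -1 ∧ ∀ k, k < j → L[k]? ≠ some c) ∨
  (∃ p : Nat, v = (p : Int) ∧ p < j ∧ L[p]? = some c ∧ ∀ k, p < k → k < j → L[k]? ≠ some c)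

theorem not_nodup_of_two (l : List Char) (i1 i2 : Nat) (h1 : i1 < l.length) (h2 : i2 < l.length)
    (hne : i1 ≠ i2) (he : l[i1] = l[i2]) : ¬ l.Nodup :=
  fun h => hne ((List.Nodup.getElem_inj_iff h).1 he)

theorem window_getElem (L : List Char) (m a i : Nat) (h1 : a + i < m) (h2 : m ≤ L.length) :
    ((L.take m).drop a)[i]'(by simp [List.length_drop, List.length_take]; omega) =
      L[a + i]'(by omega) := by
  rw [List.getElem_drop, List.getElem_take]

theorem window_succ (L : List Char) (j a : Nat) (hjlt : j < L.length) (ha : a ≤ j) :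
    (L.take (j+1)).drop a = (L.take j).drop a ++ [L[j]] := by
  rw [List.take_add_one]
  rw [List.getElem?_eq_getElem hjlt]
  rw [List.drop_append_of_le_length (by simp [List.length_take]; omega)]
  rfl

theorem LastSpec_succ (L : List Char) (j : Nat) (c' : Char) (v : Int) (hjlt : j < L.length)
    (hne : L[j] ≠ c') (h : LastSpec L j c' v) : LastSpec L (j+1) c' v := by
  rcases h with ⟨h1, h2⟩ | ⟨p, h1, h2, h3, h4⟩
  · left
    refine ⟨h1, fun k hk => ?_⟩
    rcases Nat.lt_or_ge k j with hlt | hge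
    · exact h2 k hlt
    · have : k = j := by omega
      subst this
      rw [List.getElem?_eq_getElem hjlt]
      simp only [ne_eq, Option.some_inj]
      exact hne
  · right
    refine ⟨p, h1, by omega, h3, fun k hk1 hk2 => ?_⟩
    rcases Nat.lt_or_ge k j with hlt | hge
    · exact h4 k hk1 hlt
    · have : k = j := by omega
      subst this
      rw [List.getElem?_eq_getElem hjlt]
      simp only [ne_eq, Option.some_inj]
      exact hne

theorem finishStep (L : List Char) (f j S' : Nat) (last' : PySem.Dict Char Int)
    (hjlt : j < L.length)
    (hf : L.length - (j+1) = f)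
    (hS'le : S' ≤ j + 1)
    (hgap : j + 1 - S' ≤ 14)
    (hnd' : ((L.take (j+1)).drop S').Nodup)
    (hmax' : ∀ a, a < S' → ¬ ((L.take (j+1)).drop a).Nodup)
    (hlast' : ∀ c, LastSpec L (j+1) c (last'.getD c (-1)))
    (hpast : ∀ i, i ≤ j → ¬ Good L i)
    (ih : ∀ j2 s2 : Nat, ∀ last2 : PySem.Dict Char Int, L.length - j2 = f → s2 ≤ j2 →
      j2 ≤ L.length → j2 - s2 ≤ 13 →
      ((L.take j2).drop s2).Nodup →
      (∀ a, a < s2 → ¬ ((L.take j2).drop a).Nodup) →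
      (∀ c, LastSpec L j2 c (last2.getD c (-1))) →
      (∀ i, i ≤ j2 → ¬ Good L i) →
      Res L (computeAltGo (L.drop j2) (j2 : Int) (s2 : Int) last2)) :
    Res L (if (j : Int) - (S' : Int) + 1 = 14 then (j : Int) + 1
           else computeAltGo (L.drop (j+1)) ((j : Int) + 1) ((S' : Int)) last') := by
  split_ifs with hret
  · -- the window just reached length 14: return j+1
    have hS13 : j = S' + 13 := by omega
    have hwin : (L.take (j+1)).drop S' = (L.drop S').take 14 := by
      rw [List.drop_take]; congr 1; omega
    have hgood : Good L (j + 1) := by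
      refine ⟨by omega, by omega, ?_⟩
      rw [show j + 1 - 14 = S' by omega]
      rw [← hwin]; exact hnd'
    right
    refine ⟨j + 1, by push_cast; ring, hgood, fun i' hi' => hpast i' (by omega)⟩
  · -- continue with the next character
    have hgap' : j + 1 - S' ≤ 13 := by omega
    have hpast' : ∀ i, i ≤ j + 1 → ¬ Good L i := by
      intro i hi hg
      rcases Nat.lt_or_ge i (j+1) with hlt | hge
      · exact hpast i (by omega) hg
      · have hij : i = j + 1 := by omega
        subst hij
        obtain ⟨h14, hlen, hwnd⟩ := hg
        have ha : j + 1 - 14 < S' := by omega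
        refine hmax' (j + 1 - 14) ha ?_
        rw [List.drop_take, show j + 1 - (j + 1 - 14) = 14 by omega]
        exact hwnd
    have := ih (j+1) S' last' hf hS'le (by omega) (by omega) hnd' hmax' hlast' hpast'
    rw [show (((j+1 : Nat)) : Int) = (j : Int) + 1 by push_cast; ring] at this
    exact this

theorem lemB_fuel (L : List Char) :
    ∀ fuel : Nat, ∀ j start : Nat, ∀ last : PySem.Dict Char Int,
    L.length - j = fuel → start ≤ j → j ≤ L.length → j - start ≤ 13 →
    ((L.take j).drop start).Nodup →
    (∀ a : Nat, a < start → ¬ ((L.take j).drop a).Nodup) →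
    (∀ c : Char, LastSpec L j c (last.getD c (-1))) →
    (∀ i : Nat, i ≤ j → ¬ Good L i) →
    Res L (computeAltGo (L.drop j) (j : Int) (start : Int) last) := by
  intro fuel
  induction fuel with
  | zero =>
    intro j start last hf hsj hjL hlen hnd hmax hlast hpast
    have hdrop : L.drop j = [] := by rw [List.drop_eq_nil_iff]; omega
    rw [hdrop]
    simp only [computeAltGo]
    left
    refine ⟨rfl, fun i hg => ?_⟩
    exact hpast i (by obtain ⟨_, h2, _⟩ := hg; omega) hg
  | succ f ih =>
    intro j start last hf hsj hjL hlen hnd hmax hlast hpast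
    have hjlt : j < L.length := by omega
    have hdrop : L.drop j = L[j] :: L.drop (j+1) := List.drop_eq_getElem_cons hjlt
    rw [hdrop]
    simp only [computeAltGo]
    have hLj : L[j]? = some (L[j]) := List.getElem?_eq_getElem hjlt
    -- last-seen value for the incoming character
    have hlastC' : ∀ c', LastSpec L (j+1) c' ((last.insert (L[j]) (j : Int)).getD c' (-1)) := by
      intro c'
      rw [PySem.Dict.getD_insert]
      by_cases hc' : c' = L[j]
      · rw [if_pos hc']
        right
        refine ⟨j, rfl, by omega, by rw [hc']; exact hLj, fun k hk1 hk2 => by omega⟩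
      · rw [if_neg hc']
        exact LastSpec_succ L j c' _ hjlt (fun he => hc' he.symm) (hlast c')
    rcases hlast (L[j]) with ⟨hp1, hnone⟩ | ⟨pp, hpv, hplt, hpc, hafter⟩
    · -- never seen before: start unchanged, window grows by one
      have hstart' : (if (start : Int) ≤ -1 then (-1 : Int) + 1 else (start : Int)) = (start : Int) :=
        if_neg (by omega)
      rw [hp1, hstart']
      have hnotin : L[j] ∉ (L.take j).drop start := by
        rw [mem_window_iff L (L[j]) start j (by omega)]
        rintro ⟨k, _, hk2, hke⟩
        exact hnone k hk2 hke
      have hnd' : ((L.take (j+1)).drop start).Nodup := by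
        rw [window_succ L j start hjlt hsj, nodup_append_singleton]
        exact ⟨hnd, hnotin⟩
      have hmax' : ∀ a, a < start → ¬ ((L.take (j+1)).drop a).Nodup := by
        intro a ha hcontra
        rw [window_succ L j a hjlt (by omega)] at hcontra
        exact hmax a ha ((List.sublist_append_left _ _).nodup hcontra)
      exact finishStep L f j start (last.insert (L[j]) (j : Int)) hjlt (by omega) (by omega)
        (by omega) hnd' hmax' hlastC' hpast ih
    · rcases lt_or_ge pp start with hcase | hcase
      · -- last occurrence lies before the window: start unchanged
        have hstart' : (if (start : Int) ≤ (pp : Int) then (pp : Int) + 1 else (start : Int)) = (start : Int) :=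
          if_neg (by simp only [not_le]; exact_mod_cast hcase)
        rw [hpv, hstart']
        have hnotin : L[j] ∉ (L.take j).drop start := by
          rw [mem_window_iff L (L[j]) start j (by omega)]
          rintro ⟨k, hk1, hk2, hke⟩
          rcases Nat.lt_or_ge pp k with hlt | hge
          · exact hafter k hlt hk2 hke
          · omega
        have hnd' : ((L.take (j+1)).drop start).Nodup := by
          rw [window_succ L j start hjlt hsj, nodup_append_singleton]
          exact ⟨hnd, hnotin⟩
        have hmax' : ∀ a, a < start → ¬ ((L.take (j+1)).drop a).Nodup := by
          intro a ha hcontra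
          rw [window_succ L j a hjlt (by omega)] at hcontra
          exact hmax a ha ((List.sublist_append_left _ _).nodup hcontra)
        exact finishStep L f j start (last.insert (L[j]) (j : Int)) hjlt (by omega) (by omega)
          (by omega) hnd' hmax' hlastC' hpast ih
      · -- duplicate inside the window: jump start past it
        have hstart' : (if (start : Int) ≤ (pp : Int) then (pp : Int) + 1 else (start : Int)) = (((pp + 1 : Nat)) : Int) := by
          rw [if_pos (by exact_mod_cast hcase)]; push_cast; ring
        rw [hpv, hstart']
        have htail : ((L.take j).drop (pp+1)).Nodup := by
          have heq : (L.take j).drop (pp+1) = ((L.take j).drop start).drop (pp+1-start) := by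
            rw [List.drop_drop]; congr 1; omega
          rw [heq]
          exact (List.drop_sublist _ _).nodup hnd
        have hnotin : L[j] ∉ (L.take j).drop (pp+1) := by
          rw [mem_window_iff L (L[j]) (pp+1) j (by omega)]
          rintro ⟨k, hk1, hk2, hke⟩
          exact hafter k (by omega) hk2 hke
        have hnd' : ((L.take (j+1)).drop (pp+1)).Nodup := by
          rw [window_succ L j (pp+1) hjlt (by omega), nodup_append_singleton]
          exact ⟨htail, hnotin⟩
        have hLpp : L[pp]'(by omega) = L[j] := by
          rw [List.getElem?_eq_getElem (by omega : pp < L.length)] at hpc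
          exact Option.some_inj.1 hpc
        have hmax' : ∀ a, a < pp + 1 → ¬ ((L.take (j+1)).drop a).Nodup := by
          intro a ha
          have hW : ((L.take (j+1)).drop a).length = j + 1 - a := by
            simp [List.length_drop, List.length_take]; omega
          apply not_nodup_of_two _ (pp - a) (j - a) (by omega) (by omega) (by omega)
          rw [window_getElem L (j+1) a (pp - a) (by omega) (by omega)]
          rw [window_getElem L (j+1) a (j - a) (by omega) (by omega)]
          simp only [show a + (pp - a) = pp by omega, show a + (j - a) = j by omega]
          exact hLpp
        exact finishStep L f j (pp+1) (last.insert (L[j]) (j : Int)) hjlt (by omega) (by omega)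
          (by omega) hnd' hmax' hlastC' hpast ih

theorem compute_Res (s : String) : Res s.toList (compute s) := by
  unfold compute
  have h := lemA s.toList 14 (le_refl 14)
  rw [show (((14 : Nat)) : Int) = (14 : Int) from rfl] at h
  rcases h with ⟨he, hn⟩ | ⟨i, he, hg, _, hmin⟩
  · left
    refine ⟨he, fun i hg => ?_⟩
    exact hn i hg.1 hg
  · right
    refine ⟨i, he, hg, fun i' hi' hg' => ?_⟩
    exact hmin i' hg'.1 hi' hg'

theorem compute_alt_Res (s : String) : Res s.toList (compute_alt s) := by
  unfold compute_alt
  have h := lemB_fuel s.toList s.toList.length 0 0 PySem.Dict.empty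
    (by omega) (by omega) (by omega) (by omega)
    (by simp) (by omega) ?_ (fun i hi hg => by obtain ⟨h14, _, _⟩ := hg; omega)
  · simpa using h
  · intro c
    rw [PySem.Dict.getD_empty]
    left
    exact ⟨rfl, fun k hk => by omega⟩

-- ===== VERDICT (by name: the statement is the Claim_ definition above) =====
theorem compute_spec : Claim_equal_compute := by
  intro s _
  unfold Spec_compute
  exact Res_unique (compute_Res s) (compute_alt_Res s)
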